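-- pv_equiv track=rewrite | github.com/Georgmel4757/40-Exercises | Chapter 2/ex-9.py | hexLattice
-- ===== SOURCE A (Python) =====
-- def hexLattice(number):
--     count = 1
--     product = 1
--     while count < number:
--         count += product * 6
--         product += 1
--
--     if count != number:
--         return "Invalid"
--
--     result = ""
--
--     circles = product
--     spaces = product
--     sign = "o"
--     for i in range(1, product * 2):
--         if i < product:
--             result += (f"{' '*spaces + f'{sign} '*circles}".rstrip()
--                         + f"{' '*spaces}")
--             circles += 1
--             spaces -= 1
--         else:
--             result += (f"{' '*spaces + f'{sign} '*circles}".rstrip()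
--                     + f"{' '*spaces}")
--             circles -= 1
--             spaces += 1
--
--         result += "\n"
--
--     result = result.rstrip("\n")
--
--     return result
-- ===== SOURCE B (Python) =====
-- def _isqrt(n):
--     # integer floor square root by Newton's method (no imports, like A)
--     if n < 2:
--         return n
--     x = n
--     y = (x + n // x) // 2
--     while y < x:
--         x = y
--         y = (x + n // x) // 2
--     return x
--
--
-- def hexLattice(number):
--     # closed-form inversion of the centered-hexagonal equation 3p(p-1)+1 = number
--     d = 12 * number - 3
--     if d < 0:
--         return "Invalid"
--     p = (3 + _isqrt(d)) // 6
--     if 3 * p * (p - 1) + 1 != number: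
--         return "Invalid"
--     rows = []
--     for j in range(2 * p - 1):
--         c = 2 * p - 1 - abs(j - (p - 1))
--         s = 2 * p - c
--         rows.append(" " * s + "o " * (c - 1) + "o" + " " * s)
--     return "\n".join(rows)
-- ===== Notes on version B (the rewrite author's own statement) =====
-- stated objective: alternative
-- what changed: Replaces the linear while-loop search for the hexagonal index with a closed-form inversion of the centered-hexagonal equation via a Newton integer square root, and builds each lattice row directly from its index (circle count from the row's distance to the middle row) joined with newlines, instead of mutating running circle/space counters and stripping a trailing newline.
import Mathlib
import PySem

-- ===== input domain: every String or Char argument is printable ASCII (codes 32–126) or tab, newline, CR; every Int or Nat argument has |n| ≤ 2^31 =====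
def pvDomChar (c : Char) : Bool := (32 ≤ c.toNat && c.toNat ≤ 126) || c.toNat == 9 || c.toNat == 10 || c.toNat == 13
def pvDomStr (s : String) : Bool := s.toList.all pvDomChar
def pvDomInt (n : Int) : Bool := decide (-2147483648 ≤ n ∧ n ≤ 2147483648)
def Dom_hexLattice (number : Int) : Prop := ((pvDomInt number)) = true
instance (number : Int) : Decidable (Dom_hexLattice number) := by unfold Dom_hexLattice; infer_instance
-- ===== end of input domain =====

-- B replaces A's linear search for the hexagonal index with a Newton-integer-sqrt closed form
-- and computes each lattice row from its index instead of mutating running counters (objective: alternative).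

-- ===== PORT A =====
-- A's while loop: count += product*6; product += 1 while count < number.
-- (the lexicographic measure only makes the very same loop total; it changes no value)
def hexLoopA (number count product : Int) : Int × Int :=
  if count < number then
    hexLoopA number (count + product * 6) (product + 1)
  else (count, product)
termination_by ((1 - product).toNat, (number - count).toNat)
decreasing_by
  by_cases h : 1 ≤ product
  · have h1 : (1 - (product + 1)).toNat = (1 - product).toNat := by omega
    rw [h1]
    exact Prod.Lex.right _ (by omega)
  · exact Prod.Lex.left _ _ (by omega)

-- A's loop body over the state (circles, spaces, result); f'{sign} ' with sign = "o" is "o "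
def bodyA (product : Int) (st : Int × Int × List Char) (i : Int) : Int × Int × List Char :=
  if i < product then
    (st.1 + 1, st.2.1 - 1,
     st.2.2 ++ (PySem.Chars.rstrip (PySem.List.pyRepeat [' '] st.2.1
         ++ PySem.List.pyRepeat ['o', ' '] st.1)
       ++ PySem.List.pyRepeat [' '] st.2.1) ++ ['\n'])
  else
    (st.1 - 1, st.2.1 + 1,
     st.2.2 ++ (PySem.Chars.rstrip (PySem.List.pyRepeat [' '] st.2.1
         ++ PySem.List.pyRepeat ['o', ' '] st.1)
       ++ PySem.List.pyRepeat [' '] st.2.1) ++ ['\n'])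

-- hand-ported, exact: result.rstrip("\n") strips the trailing '\n' characters
def rstripNl (cs : List Char) : List Char := (cs.reverse.dropWhile (· == '\n')).reverse

def hexLattice (number : Int) : String :=
  let cp := hexLoopA number 1 1
  if cp.1 ≠ number then "Invalid"
  else
    let product := cp.2
    let st := (PySem.List.pyRange 1 (product * 2)).foldl (bodyA product)
      (product, product, ([] : List Char))
    String.mk (rstripNl st.2.2)

-- ===== PORT B =====
-- Newton's-method integer square root loop of Source B's _isqrt
-- (the inner `0 < x` guard only makes the same computation total; x ≥ 1 holds whenever the loop is reached)
def isqrtLoopB (n x : Int) : Int :=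
  let y := PySem.Int.floordiv (x + PySem.Int.floordiv n x) 2
  if y < x then
    (if 0 < x then isqrtLoopB n y else x)
  else x
termination_by x.toNat
decreasing_by omega

def pyIsqrt (n : Int) : Int :=
  if n < 2 then n else isqrtLoopB n n

-- Source B's loop body: the row built for index j, " "*s + "o "*(c-1) + "o" + " "*s
def rowB (p j : Int) : List Char :=
  let c := 2 * p - 1 - |j - (p - 1)|
  let s := 2 * p - c
  PySem.List.pyRepeat [' '] s ++ PySem.List.pyRepeat ['o', ' '] (c - 1)
    ++ ['o'] ++ PySem.List.pyRepeat [' '] s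

def hexLattice_alt (number : Int) : String :=
  let d := 12 * number - 3
  if d < 0 then "Invalid"
  else
    let p := PySem.Int.floordiv (3 + pyIsqrt d) 6
    if 3 * p * (p - 1) + 1 ≠ number then "Invalid"
    else
      String.mk (PySem.Chars.join ['\n'] ((PySem.List.pyRange 0 (2 * p - 1)).map (rowB p)))

-- ===== PRECONDITION & SPEC =====
def Spec_hexLattice (number : Int) (out : String) : Prop := out = hexLattice_alt number
instance (number : Int) (out : String) : Decidable (Spec_hexLattice number out) := by unfold Spec_hexLattice; infer_instance

-- ===== CLAIM (what is proved, stated in full; the proofs are below) =====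
def Claim_equal_hexLattice : Prop := ∀ (number : Int), Dom_hexLattice number → Spec_hexLattice number (hexLattice number)

-- ===== LEMMAS AND PROOFS =====

lemma pyRange_nil_of_le (a b : Int) (h : b ≤ a) : PySem.List.pyRange a b = [] := by
  simp [PySem.List.pyRange]
  omega

-- Newton loop: on a perfect square m*m (m ≥ 1), starting from any x ≥ m, it returns m
lemma isqrtLoopB_fixed : ∀ (k : Nat) (m x : Int), 1 ≤ m → m ≤ x → x.toNat ≤ k →
    isqrtLoopB (m * m) x = m := by
  intro k
  induction k with
  | zero => intro m x hm hx hk; omega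
  | succ k ih =>
    intro m x hm hx hk
    rw [isqrtLoopB]
    have hx0 : (0:Int) < x := by omega
    rcases eq_or_lt_of_le hx with rfl | hlt
    · -- x = m : y = m, the loop stops
      have hq : PySem.Int.floordiv (m * m) m = m := by
        rw [PySem.Int.floordiv_eq_ediv_of_pos hx0]
        exact Int.mul_ediv_cancel_left m (by omega)
      rw [hq]
      have h2 : (m + m) / 2 = m := by omega
      simp [PySem.Int.floordiv_eq_ediv_of_pos, h2]
    · -- m < x : one Newton step lands in [m, x)
      set q := PySem.Int.floordiv (m * m) x with hqdef
      have hq : q = (m * m) / x := by rw [hqdef, PySem.Int.floordiv_eq_ediv_of_pos hx0]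
      have hdm := Int.mul_ediv_add_emod (m * m) x
      have hm1 := Int.emod_nonneg (m * m) (by omega : x ≠ 0)
      have hm2 := Int.emod_lt_of_pos (m * m) hx0
      have hqb1 : q * x ≤ m * m := by nlinarith [hdm, hm1]
      have hqb2 : m * m ≤ q * x + x - 1 := by nlinarith [hdm, hm2]
      set y := PySem.Int.floordiv (x + q) 2 with hydef
      have hy : y = (x + q) / 2 := by
        rw [hydef, PySem.Int.floordiv_eq_ediv_of_pos (by omega : (0:Int) < 2)]
      have hyb1 : 2 * y ≤ x + q := by rw [hy]; omega
      have hyb2 : x + q ≤ 2 * y + 1 := by rw [hy]; omega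
      have hqltx : q < x := by nlinarith
      have hge : 2 * m ≤ x + q := by nlinarith
      have hym : m ≤ y := by omega
      have hyx : y < x := by omega
      rw [if_pos hyx, if_pos hx0]
      exact ih m y hm hym (by omega)

lemma pyIsqrt_sq (m : Int) (hm : 1 ≤ m) : pyIsqrt (m * m) = m := by
  rcases eq_or_lt_of_le hm with rfl | hm2
  · decide
  · rw [pyIsqrt, if_neg (by nlinarith)]
    exact isqrtLoopB_fixed (m * m).toNat m (m * m) hm (by nlinarith) le_rfl

-- A's search loop: if 3p(p-1)+1 = number with p ≥ 1, starting at any q ∈ [1,p] it ends at (number, p)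
lemma hexLoopA_valid : ∀ (d : Nat) (n p q : Int), 1 ≤ q → q ≤ p → (p - q).toNat ≤ d →
    3 * p * (p - 1) + 1 = n → hexLoopA n (3 * q * (q - 1) + 1) q = (n, p) := by
  intro d
  induction d with
  | zero =>
    intro n p q h1 h2 hd hn
    have : q = p := by omega
    subst this; subst hn
    rw [hexLoopA, if_neg (by omega)]
  | succ d ih =>
    intro n p q h1 h2 hd hn
    rcases eq_or_lt_of_le h2 with rfl | hlt
    · subst hn; rw [hexLoopA, if_neg (by omega)]
    · have hcl : 3 * q * (q - 1) + 1 < n := by nlinarith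
      rw [hexLoopA, if_pos hcl]
      have he : 3 * q * (q - 1) + 1 + q * 6 = 3 * (q + 1) * ((q + 1) - 1) + 1 := by ring
      rw [he]
      exact ih n p (q + 1) (by omega) (by omega) (by omega) hn

-- A's search loop always stops at a centered-hexagonal count
lemma hexLoopA_shape : ∀ (d : Nat) (n q : Int), 1 ≤ q → (n - (3 * q * (q - 1) + 1)).toNat ≤ d →
    ∃ m, 1 ≤ m ∧ hexLoopA n (3 * q * (q - 1) + 1) q = (3 * m * (m - 1) + 1, m) := by
  intro d
  induction d with
  | zero =>
    intro n q h1 hd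
    refine ⟨q, h1, ?_⟩
    rw [hexLoopA, if_neg (by omega)]
  | succ d ih =>
    intro n q h1 hd
    by_cases hc : 3 * q * (q - 1) + 1 < n
    · rw [hexLoopA, if_pos hc]
      have he : 3 * q * (q - 1) + 1 + q * 6 = 3 * (q + 1) * ((q + 1) - 1) + 1 := by ring
      rw [he]
      refine ih n (q + 1) (by omega) ?_
      rw [← he]
      set c := 3 * q * (q - 1) + 1 with hcdef
      omega
    · exact ⟨q, h1, by rw [hexLoopA, if_neg hc]⟩

-- any integer solution of 3p(p-1)+1 = n yields one with p ≥ 1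
lemma sol_pos (n p : Int) (h : 3 * p * (p - 1) + 1 = n) : ∃ q, 1 ≤ q ∧ 3 * q * (q - 1) + 1 = n := by
  by_cases hp : 1 ≤ p
  · exact ⟨p, hp, h⟩
  · exact ⟨1 - p, by omega, by nlinarith [h]⟩

lemma isspace_space : PySem.Chars.isspace ' ' = true := by decide
lemma isspace_o : PySem.Chars.isspace 'o' = false := by decide

-- rstrip of anything ending in "o " is that thing ending in "o"
lemma rstrip_append_o_space (X : List Char) :
    PySem.Chars.rstrip (X ++ ['o', ' ']) = X ++ ['o'] := by
  simp [PySem.Chars.rstrip, List.reverse_append, List.dropWhile, isspace_space, isspace_o]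

lemma pyRepeat_pair_succ (c : Int) (h : 1 ≤ c) :
    PySem.List.pyRepeat ['o', ' '] c = PySem.List.pyRepeat ['o', ' '] (c - 1) ++ ['o', ' '] := by
  have h1 : c.toNat = (c - 1).toNat + 1 := by omega
  unfold PySem.List.pyRepeat
  rw [h1, List.replicate_succ']
  simp

-- A's per-row string equals B's row
lemma line_eq (p k : Int) (h1 : 1 ≤ k) (h2 : k < 2 * p) :
    PySem.Chars.rstrip (PySem.List.pyRepeat [' '] (1 + |k - p|)
        ++ PySem.List.pyRepeat ['o', ' '] (2 * p - 1 - |k - p|))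
      ++ PySem.List.pyRepeat [' '] (1 + |k - p|) = rowB p (k - 1) := by
  have habs : |k - 1 - (p - 1)| = |k - p| := by congr 1; ring
  have hc : (1:Int) ≤ 2 * p - 1 - |k - p| := by
    rcases abs_cases (k - p) with ⟨h, _⟩ | ⟨h, _⟩ <;> omega
  rw [pyRepeat_pair_succ _ hc, ← List.append_assoc, rstrip_append_o_space]
  simp only [rowB, habs]
  have hs : 2 * p - (2 * p - 1 - |k - p|) = 1 + |k - p| := by ring
  rw [hs]

-- A's fold, from the state the counters have at index k, appends exactly B's rows (newline-terminated)
lemma foldA_inv (p : Int) : ∀ (d : Nat) (k : Int), 1 ≤ k → k ≤ 2 * p →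
    (2 * p - k).toNat ≤ d → ∀ acc : List Char,
    ((PySem.List.pyRange k (2 * p)).foldl (bodyA p) (2 * p - 1 - |k - p|, 1 + |k - p|, acc)).2.2
      = acc ++ (PySem.List.pyRange (k - 1) (2 * p - 1)).flatMap (fun j => rowB p j ++ ['\n']) := by
  intro d
  induction d with
  | zero =>
    intro k h1 h2 hd acc
    have hk : k = 2 * p := by omega
    subst hk
    rw [pyRange_nil_of_le _ _ le_rfl, pyRange_nil_of_le _ _ (by omega)]
    simp
  | succ d ih =>
    intro k h1 h2 hd acc
    rcases eq_or_lt_of_le h2 with rfl | hlt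
    · rw [pyRange_nil_of_le _ _ le_rfl, pyRange_nil_of_le _ _ (by omega)]
      simp
    · rw [PySem.List.pyRange_one_cons hlt, PySem.List.pyRange_one_cons (by omega : k - 1 < 2 * p - 1)]
      rw [List.foldl_cons, List.flatMap_cons]
      have hline := line_eq p k h1 hlt
      have hstep : bodyA p (2 * p - 1 - |k - p|, 1 + |k - p|, acc) k
          = (2 * p - 1 - |k + 1 - p|, 1 + |k + 1 - p|, acc ++ (rowB p (k - 1) ++ ['\n'])) := by
        by_cases hkp : k < p
        · have ha1 : |k - p| = p - k := by rw [abs_of_neg (by omega)]; ring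
          have ha2 : |k + 1 - p| = p - (k + 1) := by
            rcases eq_or_lt_of_le (by omega : k + 1 ≤ p) with h | h
            · rw [show k + 1 - p = 0 by omega]; simp; omega
            · rw [abs_of_neg (by omega)]; ring
          rw [bodyA, if_pos hkp]
          simp only []
          rw [← hline, ha1, ha2]
          simp only [Prod.mk.injEq]
          refine ⟨by ring, by ring, by simp [List.append_assoc]⟩
        · have ha1 : |k - p| = k - p := by rw [abs_of_nonneg (by omega)]
          have ha2 : |k + 1 - p| = k + 1 - p := by rw [abs_of_nonneg (by omega)]
          rw [bodyA, if_neg (by omega)]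
          simp only []
          rw [← hline, ha1, ha2]
          simp only [Prod.mk.injEq]
          refine ⟨by ring, by ring, by simp [List.append_assoc]⟩
      rw [hstep]
      have := ih (k + 1) (by omega) (by omega) (by omega) (acc ++ (rowB p (k - 1) ++ ['\n']))
      rw [show k + 1 - 1 = k by ring] at this
      rw [this]
      simp [List.append_assoc]

-- stripping the final newline from newline-terminated rows is joining them with newlines
lemma rstripNl_flatMap : ∀ (rows : List (List Char)), rows ≠ [] →
    (∀ r ∈ rows, ∃ r', r = r' ++ [' ']) →
    rstripNl (rows.flatMap (· ++ ['\n'])) = PySem.Chars.join ['\n'] rows := by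
  intro rows
  induction rows with
  | nil => intro h; exact absurd rfl h
  | cons r rest ih =>
    intro _ hsp
    obtain ⟨r', hr'⟩ := hsp r List.mem_cons_self
    cases rest with
    | nil =>
      simp only [List.flatMap_cons, List.flatMap_nil, List.append_nil, PySem.Chars.join_singleton]
      rw [hr', rstripNl]
      simp [List.reverse_append, List.dropWhile]
    | cons r2 rest2 =>
      have hne : r2 :: rest2 ≠ [] := by simp
      have hsp2 : ∀ x ∈ r2 :: rest2, ∃ r', x = r' ++ [' '] :=
        fun x hx => hsp x (List.mem_cons_of_mem _ hx)
      have hih := ih hne hsp2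
      rw [List.flatMap_cons, PySem.Chars.join_cons_cons]
      have hYne : ∃ x ∈ ((r2 :: rest2).flatMap (· ++ ['\n'])), ¬ (x == '\n') = true := by
        obtain ⟨r2', hr2'⟩ := hsp2 r2 List.mem_cons_self
        refine ⟨' ', ?_, by decide⟩
        apply List.mem_flatMap.mpr
        exact ⟨r2, List.mem_cons_self, by rw [hr2']; simp⟩
      rw [rstripNl, List.reverse_append, List.dropWhile_append]
      rw [if_neg]
      · rw [List.reverse_append]
        simp only [List.reverse_reverse]
        rw [show (List.dropWhile (fun x => x == '\n') ((r2 :: rest2).flatMap (· ++ ['\n'])).reverse).reverse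
              = rstripNl ((r2 :: rest2).flatMap (· ++ ['\n'])) from rfl]
        rw [hih]
      · simp only [List.isEmpty_iff, List.dropWhile_eq_nil_iff]
        push Not
        obtain ⟨x, hx, hxn⟩ := hYne
        refine ⟨x, ?_, by simpa using hxn⟩
        simp only [List.mem_reverse] at *
        simpa using hx

lemma pyRepeat_space_succ (s : Int) (h : 1 ≤ s) :
    PySem.List.pyRepeat [' '] s = PySem.List.pyRepeat [' '] (s - 1) ++ [' '] := by
  rw [PySem.List.pyRepeat_singleton, PySem.List.pyRepeat_singleton,
    show s.toNat = (s - 1).toNat + 1 by omega, List.replicate_succ']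

lemma rowB_ends_space (p j : Int) : ∃ r', rowB p j = r' ++ [' '] := by
  simp only [rowB]
  have hs : (1:Int) ≤ 2 * p - (2 * p - 1 - |j - (p - 1)|) := by
    rcases abs_cases (j - (p - 1)) with ⟨h, _⟩ | ⟨h, _⟩ <;> omega
  rw [pyRepeat_space_succ _ hs]
  refine ⟨(PySem.List.pyRepeat [' '] (2 * p - (2 * p - 1 - |j - (p - 1)|) - 1) ++ [' '])
    ++ PySem.List.pyRepeat ['o', ' '] (2 * p - 1 - |j - (p - 1)| - 1) ++ ['o']
    ++ PySem.List.pyRepeat [' '] (2 * p - (2 * p - 1 - |j - (p - 1)|) - 1), ?_⟩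
  simp [List.append_assoc]

lemma main_eq (number : Int) : hexLattice number = hexLattice_alt number := by
  by_cases hsol : ∃ p, 1 ≤ p ∧ 3 * p * (p - 1) + 1 = number
  · obtain ⟨p, hp, hpn⟩ := hsol
    have hA : hexLoopA number 1 1 = (number, p) := by
      have h := hexLoopA_valid (p - 1).toNat number p 1 le_rfl hp (by omega) hpn
      norm_num at h
      exact h
    have hd : 12 * number - 3 = (6 * p - 3) * (6 * p - 3) := by nlinarith [hpn]
    have hdn : ¬ (12 * number - 3 < 0) := by nlinarith
    have hisq : pyIsqrt (12 * number - 3) = 6 * p - 3 := by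
      rw [hd]; exact pyIsqrt_sq _ (by omega)
    have hP : PySem.Int.floordiv (3 + pyIsqrt (12 * number - 3)) 6 = p := by
      rw [hisq, show (3:Int) + (6 * p - 3) = 6 * p by ring,
        PySem.Int.floordiv_eq_ediv_of_pos (by norm_num : (0:Int) < 6)]
      exact Int.mul_ediv_cancel_left p (by norm_num)
    rw [hexLattice, hexLattice_alt]
    simp only [hA, hP, ne_eq]
    rw [if_neg (by simp), if_neg hdn, if_neg (by rw [hpn]; simp)]
    congr 1
    have habs : |(1:Int) - p| = p - 1 := by rw [abs_of_nonpos (by omega)]; ring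
    have hinit : ((p:Int), (p:Int), ([] : List Char))
        = (2 * p - 1 - |(1:Int) - p|, 1 + |(1:Int) - p|, ([] : List Char)) := by
      rw [habs, show 2 * p - 1 - (p - 1) = p from by ring, show 1 + (p - 1) = p from by ring]
    rw [show p * 2 = 2 * p by ring, hinit,
      foldA_inv p (2 * p - 1).toNat 1 le_rfl (by omega) (by omega) []]
    rw [List.nil_append, show (1:Int) - 1 = 0 by ring,
      ← List.flatMap_map (rowB p) (fun r => r ++ ['\n']) (PySem.List.pyRange 0 (2 * p - 1))]
    apply rstripNl_flatMap
    · rw [PySem.List.pyRange_one_cons (by omega : (0:Int) < 2 * p - 1)]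
      simp
    · intro r hr
      obtain ⟨j, _, rfl⟩ := List.mem_map.mp hr
      exact rowB_ends_space p j
  · have h0 : (3:Int) * 1 * (1 - 1) + 1 = 1 := by norm_num
    obtain ⟨m, hm, hEq⟩ := hexLoopA_shape (number - 1).toNat number 1 le_rfl (by rw [h0])
    rw [h0] at hEq
    have hAne : (hexLoopA number 1 1).1 ≠ number := by
      rw [hEq]
      intro hc
      exact hsol ⟨m, hm, hc⟩
    rw [hexLattice, hexLattice_alt]
    rw [if_pos hAne]
    by_cases hdneg : 12 * number - 3 < 0
    · rw [if_pos hdneg]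
    · rw [if_neg hdneg, if_pos]
      intro hc
      obtain ⟨q, hq1, hq2⟩ := sol_pos number _ hc
      exact hsol ⟨q, hq1, hq2⟩

-- ===== VERDICT (by name: the statement is the Claim_ definition above) =====
theorem hexLattice_spec : Claim_equal_hexLattice := by
  intro number _
  exact main_eq number
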